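-- pv_equiv track=rewrite | github.com/dsparber/advent-of-code | 2023/18/solution.py | absolute_coordinates
-- ===== SOURCE A (Python) =====
-- from typing import Iterable
--
-- def absolute_coordinates(deltas: Iterable[tuple[int, int]]) -> list[tuple[int, int]]:
--     current_coordinate = 0, 0
--     coordinates = [current_coordinate]
--     for dx, dy in deltas:
--         x, y = current_coordinate
--         current_coordinate = x + dx, y + dy
--         coordinates.append(current_coordinate)
--
--     return coordinates
-- ===== SOURCE B (Python) =====
-- def _prefix_sums(nums):
--     out = [0]
--     for v in nums:
--         out.append(out[-1] + v)
--     return out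
--
-- def absolute_coordinates(deltas):
--     ds = list(deltas)
--     xs = _prefix_sums(d[0] for d in ds)
--     ys = _prefix_sums(d[1] for d in ds)
--     return list(zip(xs, ys))
-- ===== Notes on version B (the rewrite author's own statement) =====
-- stated objective: idiomatic
-- what changed: Replaces the single stateful tuple-accumulating loop with a split-then-zip decomposition: the deltas are split into x and y columns, each column gets an independent prefix-sum pass starting from 0, and the two cumulative streams are zipped back into coordinates.
import Mathlib
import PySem

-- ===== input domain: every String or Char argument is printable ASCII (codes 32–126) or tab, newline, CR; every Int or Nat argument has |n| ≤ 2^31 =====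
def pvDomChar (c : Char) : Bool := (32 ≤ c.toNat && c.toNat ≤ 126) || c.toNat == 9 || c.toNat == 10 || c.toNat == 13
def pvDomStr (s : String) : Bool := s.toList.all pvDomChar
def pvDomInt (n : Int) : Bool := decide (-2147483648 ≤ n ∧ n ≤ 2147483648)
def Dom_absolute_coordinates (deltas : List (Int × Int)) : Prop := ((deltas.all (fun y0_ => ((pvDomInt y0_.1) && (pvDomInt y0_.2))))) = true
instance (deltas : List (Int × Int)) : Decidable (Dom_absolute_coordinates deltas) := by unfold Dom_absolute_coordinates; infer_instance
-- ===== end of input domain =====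

-- B replaces A's single stateful loop by two independent per-column prefix-sum passes zipped together (idiomatic decomposition, same cost).

-- ===== PORT A =====
-- A: one loop carrying (current_coordinate, coordinates), appending each new coordinate.
def absolute_coordinates (deltas : List (Int × Int)) : List (Int × Int) :=
  (deltas.foldl
    (fun (st : (Int × Int) × List (Int × Int)) d =>
      let cur := (st.1.1 + d.1, st.1.2 + d.2)
      (cur, st.2 ++ [cur]))
    ((0, 0), [(0, 0)])).2

-- ===== PORT B =====
-- B helper: prefix sums starting at 0, appending out[-1] + v each step.
def pvPrefixSums (nums : List Int) : List Int :=
  nums.foldl (fun (out : List Int) v => out ++ [out.getLastD 0 + v]) [0]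

def absolute_coordinates_alt (deltas : List (Int × Int)) : List (Int × Int) :=
  List.zip (pvPrefixSums (deltas.map Prod.fst)) (pvPrefixSums (deltas.map Prod.snd))

-- ===== PRECONDITION & SPEC =====
def Spec_absolute_coordinates (deltas : List (Int × Int)) (out : List (Int × Int)) : Prop := out = absolute_coordinates_alt deltas
instance (deltas : List (Int × Int)) (out : List (Int × Int)) : Decidable (Spec_absolute_coordinates deltas out) := by unfold Spec_absolute_coordinates; infer_instance

-- ===== CLAIM (what is proved, stated in full; the proofs are below) =====
def Claim_equal_absolute_coordinates : Prop := ∀ (deltas : List (Int × Int)), Dom_absolute_coordinates deltas → Spec_absolute_coordinates deltas (absolute_coordinates deltas)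

-- ===== LEMMAS AND PROOFS =====

-- clean recursive description of the coordinate stream from (x, y)
def pvCoords (x y : Int) : List (Int × Int) → List (Int × Int)
  | [] => [(x, y)]
  | d :: ds => (x, y) :: pvCoords (x + d.1) (y + d.2) ds

-- clean recursive description of prefix sums from s
def pvSums (s : Int) : List Int → List Int
  | [] => [s]
  | v :: vs => s :: pvSums (s + v) vs

theorem foldlA_eq (deltas : List (Int × Int)) (x y : Int) (acc : List (Int × Int)) :
    (deltas.foldl
      (fun (st : (Int × Int) × List (Int × Int)) d =>
        let cur := (st.1.1 + d.1, st.1.2 + d.2)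
        (cur, st.2 ++ [cur]))
      ((x, y), acc ++ [(x, y)])).2 = acc ++ pvCoords x y deltas := by
  induction deltas generalizing x y acc with
  | nil => simp [pvCoords]
  | cons d ds ih =>
    simp only [List.foldl_cons, pvCoords]
    calc (ds.foldl _ ((x + d.1, y + d.2), (acc ++ [(x, y)]) ++ [(x + d.1, y + d.2)])).2
        = (acc ++ [(x, y)]) ++ pvCoords (x + d.1) (y + d.2) ds := by
          exact ih (x + d.1) (y + d.2) (acc ++ [(x, y)])
      _ = acc ++ ((x, y) :: pvCoords (x + d.1) (y + d.2) ds) := by simp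

theorem foldlB_eq (nums : List Int) (s : Int) (acc : List Int) :
    nums.foldl (fun (out : List Int) v => out ++ [out.getLastD 0 + v]) (acc ++ [s])
      = acc ++ pvSums s nums := by
  induction nums generalizing s acc with
  | nil => simp [pvSums]
  | cons v vs ih =>
    simp only [List.foldl_cons, pvSums]
    have h : (acc ++ [s]).getLastD 0 = s := by simp
    rw [h]
    calc vs.foldl _ ((acc ++ [s]) ++ [s + v])
        = (acc ++ [s]) ++ pvSums (s + v) vs := ih (s + v) (acc ++ [s])
      _ = acc ++ (s :: pvSums (s + v) vs) := by simp

theorem zip_sums (deltas : List (Int × Int)) (x y : Int) :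
    List.zip (pvSums x (deltas.map Prod.fst)) (pvSums y (deltas.map Prod.snd))
      = pvCoords x y deltas := by
  induction deltas generalizing x y with
  | nil => simp [pvSums, pvCoords]
  | cons d ds ih =>
    simp only [List.map_cons, pvSums, pvCoords, List.zip_cons_cons]
    exact congrArg _ (ih _ _)

-- ===== VERDICT (by name: the statement is the Claim_ definition above) =====
theorem absolute_coordinates_spec : Claim_equal_absolute_coordinates := by
  intro deltas _
  unfold Spec_absolute_coordinates absolute_coordinates absolute_coordinates_alt pvPrefixSums
  have hA := foldlA_eq deltas 0 0 []
  have hBx := foldlB_eq (deltas.map Prod.fst) 0 []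
  have hBy := foldlB_eq (deltas.map Prod.snd) 0 []
  simp only [List.nil_append] at hA hBx hBy
  rw [hA, hBx, hBy, zip_sums]
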